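-- pv_equiv track=rewrite | github.com/Romanafanasyev/tile-paint | src/painter/cli/__main__.py | _normalize_brush_list
-- ===== SOURCE A (Python) =====
-- from typing import Any, Dict, List, Optional
--
-- def _normalize_brush_list(v: Optional[List[str]]) -> Optional[List[str]]:
--     if not v:
--         return None
--     out: List[str] = []
--     for item in v:
--         parts = [s.strip() for s in item.split(",")] if "," in item else [item.strip()]
--         out.extend([p for p in parts if p])
--     return out or None
-- ===== SOURCE B (Python) =====
-- from typing import List, Optional
--
-- def _normalize_brush_list(v: Optional[List[str]]) -> Optional[List[str]]:
--     if not v: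
--         return None
--     result: List[str] = []
--     for item in v:
--         buf: List[str] = []
--         for ch in item:
--             if ch == ',':
--                 tok = ''.join(buf).strip()
--                 if tok:
--                     result.append(tok)
--                 buf = []
--             else:
--                 buf.append(ch)
--         tok = ''.join(buf).strip()
--         if tok:
--             result.append(tok)
--     return result or None
-- ===== Notes on version B (the rewrite author's own statement) =====
-- stated objective: alternative
-- what changed: B replaces A's per-item 'in'-test + str.split + list-comprehension pipeline by a character-level state machine: it scans each item one character at a time with an explicit token buffer, flushing (strip, drop-if-empty, append) whenever a comma or the end of the item is reached, so no split/substring machinery is used at all.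
import Mathlib
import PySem

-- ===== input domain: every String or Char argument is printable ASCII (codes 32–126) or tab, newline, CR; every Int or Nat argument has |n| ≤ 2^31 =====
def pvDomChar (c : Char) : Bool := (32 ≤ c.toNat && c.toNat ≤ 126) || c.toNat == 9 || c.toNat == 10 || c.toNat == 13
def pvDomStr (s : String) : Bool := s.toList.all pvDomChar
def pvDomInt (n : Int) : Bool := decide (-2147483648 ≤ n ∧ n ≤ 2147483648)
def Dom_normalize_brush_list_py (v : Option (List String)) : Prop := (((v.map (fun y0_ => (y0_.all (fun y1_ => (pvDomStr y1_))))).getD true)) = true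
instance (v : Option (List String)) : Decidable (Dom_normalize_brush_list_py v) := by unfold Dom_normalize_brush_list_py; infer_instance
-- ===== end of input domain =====

-- B replaces A's split/strip pipeline by a character-level state machine with an explicit token buffer (alternative algorithm, same result).

-- ===== PORT A =====
def normalize_brush_list_py (v : Option (List String)) : Option (List String) :=
  match v with
  | none => none
  | some xs =>
    if xs = [] then none
    else
      let out : List String := xs.foldl (fun out item =>
        let parts : List String :=
          if PySem.Str.isIn "," item then
            ((PySem.Chars.splitOn item.toList ",".toList).map String.ofList).map PySem.Str.strip
          else [PySem.Str.strip item]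
        out ++ parts.filter (fun p => p != "")) []
      if out = [] then none else some out

-- ===== PORT B =====
-- B's inner character loop: scan chars with a token buffer, flush on ',' and at the end
def pvScan (cs : List Char) (buf : List Char) (res : List String) : List String :=
  match cs with
  | [] =>
    let tok := PySem.Str.strip (String.ofList buf)
    if tok != "" then res ++ [tok] else res
  | c :: rest =>
    if c = ',' then
      let tok := PySem.Str.strip (String.ofList buf)
      pvScan rest [] (if tok != "" then res ++ [tok] else res)
    else
      pvScan rest (buf ++ [c]) res

def normalize_brush_list_py_alt (v : Option (List String)) : Option (List String) :=
  match v with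
  | none => none
  | some xs =>
    if xs = [] then none
    else
      let result : List String := xs.foldl (fun res item => pvScan item.toList [] res) []
      if result = [] then none else some result

-- ===== PRECONDITION & SPEC =====
def Spec_normalize_brush_list_py (v : Option (List String)) (out : Option (List String)) : Prop := out = normalize_brush_list_py_alt v
instance (v : Option (List String)) (out : Option (List String)) : Decidable (Spec_normalize_brush_list_py v out) := by unfold Spec_normalize_brush_list_py; infer_instance

-- ===== CLAIM (what is proved, stated in full; the proofs are below) =====
def Claim_equal_normalize_brush_list_py : Prop := ∀ (v : Option (List String)), Dom_normalize_brush_list_py v → Spec_normalize_brush_list_py v (normalize_brush_list_py v)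

-- ===== LEMMAS AND PROOFS =====

-- prepend x onto the first block of a block list (the shape splitOn's accumulator produces)
def pvConsHead (x : List Char) : List (List Char) → List (List Char)
  | [] => [x]
  | y :: ys => (x ++ y) :: ys

-- the obvious structural recursion computing a single-char split on ','
def pvSplit : List Char → List (List Char)
  | [] => [[]]
  | c :: rest => if c = ',' then [] :: pvSplit rest else pvConsHead [c] (pvSplit rest)

theorem pvSplit_ne_nil (l : List Char) : pvSplit l ≠ [] := by
  cases l with
  | nil => simp [pvSplit]
  | cons c rest =>
    simp only [pvSplit]
    split
    · simp
    · cases h : pvSplit rest <;> simp [pvConsHead]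

theorem pvConsHead_nil (l : List (List Char)) (h : l ≠ []) : pvConsHead [] l = l := by
  cases l with
  | nil => exact absurd rfl h
  | cons y ys => simp [pvConsHead]

theorem pvConsHead_consHead (a b : List Char) (l : List (List Char)) (h : l ≠ []) :
    pvConsHead a (pvConsHead b l) = pvConsHead (a ++ b) l := by
  cases l with
  | nil => exact absurd rfl h
  | cons y ys => simp [pvConsHead]

set_option maxRecDepth 4000 in
theorem pv_go_eq (l : List Char) : ∀ (fuel : Nat) (cur : List Char) (acc : List (List Char)),
    l.length ≤ fuel →
    PySem.Chars.splitOn.go [','] fuel l cur acc = acc.reverse ++ pvConsHead cur.reverse (pvSplit l) := by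
  induction l with
  | nil =>
    intro fuel cur acc _
    cases fuel <;> simp [PySem.Chars.splitOn.go, pvSplit, pvConsHead]
  | cons c rest ih =>
    intro fuel cur acc hle
    cases fuel with
    | zero => simp at hle
    | succ fuel =>
      rw [PySem.Chars.splitOn.go.eq_def]
      simp only [List.isPrefixOf]
      by_cases hc : c = ','
      · subst hc
        simp only [beq_self_eq_true, Bool.true_and, if_pos]
        have hdrop : List.drop [','].length (',' :: rest) = rest := rfl
        rw [hdrop, ih fuel [] (cur.reverse :: acc) (by simpa using Nat.le_of_succ_le_succ hle)]
        have hsplit : pvSplit (',' :: rest) = [] :: pvSplit rest := by simp [pvSplit]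
        rw [hsplit]
        have h1 : pvConsHead ([] : List Char).reverse (pvSplit rest) = pvSplit rest := by
          rw [List.reverse_nil, pvConsHead_nil _ (pvSplit_ne_nil rest)]
        have h2 : pvConsHead cur.reverse ([] :: pvSplit rest) = (cur.reverse ++ []) :: pvSplit rest := rfl
        rw [h1, h2]
        simp
      · have hbeq : ((',' == c) = false) := beq_eq_false_iff_ne.mpr (Ne.symm hc)
        simp only [hbeq, Bool.false_and]
        rw [if_neg Bool.false_ne_true]
        rw [ih fuel (c :: cur) acc (by simpa using Nat.le_of_succ_le_succ hle)]
        simp only [pvSplit, if_neg hc, List.reverse_cons]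
        cases h : pvSplit rest with
        | nil => exact absurd h (pvSplit_ne_nil rest)
        | cons y ys =>
          have h1 : pvConsHead (cur.reverse ++ [c]) (y :: ys) = ((cur.reverse ++ [c]) ++ y) :: ys := rfl
          have h2 : pvConsHead [c] (y :: ys) = ([c] ++ y) :: ys := rfl
          have h3 : pvConsHead cur.reverse (([c] ++ y) :: ys) = (cur.reverse ++ ([c] ++ y)) :: ys := rfl
          rw [h1, h2, h3]
          simp

theorem pv_splitOn_eq (l : List Char) : PySem.Chars.splitOn l [','] = pvSplit l := by
  unfold PySem.Chars.splitOn
  rw [pv_go_eq l (l.length + 1) [] [] (Nat.le_succ _)]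
  simpa using pvConsHead_nil _ (pvSplit_ne_nil l)

theorem pvSplit_no_comma (l : List Char) (h : ',' ∉ l) : pvSplit l = [l] := by
  induction l with
  | nil => rfl
  | cons c rest ih =>
    have hc : c ≠ ',' := fun hh => h (hh ▸ List.mem_cons_self)
    have hrest : ',' ∉ rest := fun hh => h (List.mem_cons_of_mem _ hh)
    simp [pvSplit, hc, ih hrest, pvConsHead]

-- per-item: A's branchy processing equals the uniform split-strip-filter
theorem pv_item_eq (item : String) :
    ((if PySem.Str.isIn "," item then
        ((PySem.Chars.splitOn item.toList ",".toList).map String.ofList).map PySem.Str.strip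
      else [PySem.Str.strip item]).filter (fun p => p != ""))
    = (((pvSplit item.toList).map String.ofList).map PySem.Str.strip).filter (fun p => p != "") := by
  by_cases hin : PySem.Str.isIn "," item = true
  · rw [if_pos hin]
    have hsep : (",".toList : List Char) = [','] := rfl
    rw [hsep, pv_splitOn_eq]
  · rw [if_neg hin]
    have hnotin : ¬ ([','] <:+: item.toList) := by
      have hiff := PySem.Chars.isIn_eq_false_iff [','] item.toList
      have hfalse : PySem.Chars.isIn [','] item.toList = false := by
        simpa [PySem.Str.isIn] using eq_false_of_ne_true hin
      exact hiff.mp hfalse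
    have hmem : ',' ∉ item.toList := by
      intro hm
      obtain ⟨s, t, hst⟩ := List.append_of_mem hm
      exact hnotin ⟨s, t, by simp [hst]⟩
    rw [pvSplit_no_comma _ hmem]
    simp

-- B's scanner computes exactly split-strip-filter of (buffer prepended onto) the remaining chars
theorem pvScan_eq (cs : List Char) : ∀ (buf : List Char) (res : List String),
    pvScan cs buf res
      = res ++ (((pvConsHead buf (pvSplit cs)).map String.ofList).map PySem.Str.strip).filter
          (fun p => p != "") := by
  induction cs with
  | nil =>
    intro buf res
    simp only [pvScan, pvSplit, pvConsHead, List.append_nil, List.map_cons, List.map_nil,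
      List.filter]
    split <;> rename_i h <;> simp [h]
  | cons c rest ih =>
    intro buf res
    by_cases hc : c = ','
    · subst hc
      have hstep : pvScan (',' :: rest) buf res =
          pvScan rest [] (if PySem.Str.strip (String.ofList buf) != "" then
            res ++ [PySem.Str.strip (String.ofList buf)] else res) := by
        simp [pvScan]
      rw [hstep, ih [] _, pvConsHead_nil _ (pvSplit_ne_nil rest)]
      have hsplit : pvSplit (',' :: rest) = [] :: pvSplit rest := by simp [pvSplit]
      rw [hsplit]
      have h2 : pvConsHead buf ([] :: pvSplit rest) = (buf ++ []) :: pvSplit rest := rfl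
      rw [h2, List.append_nil]
      by_cases ht : PySem.Str.strip (String.ofList buf) = "" <;>
        simp [ht]
    · simp only [pvScan, if_neg hc]
      rw [ih (buf ++ [c]) res]
      have hsplit : pvSplit (c :: rest) = pvConsHead [c] (pvSplit rest) := by
        simp [pvSplit, hc]
      rw [hsplit, pvConsHead_consHead _ _ _ (pvSplit_ne_nil rest)]

-- the two accumulating loops agree from any common accumulator
theorem pv_foldl_eq (xs : List String) : ∀ (acc : List String),
    xs.foldl (fun out item =>
      out ++ ((if PySem.Str.isIn "," item then
          ((PySem.Chars.splitOn item.toList ",".toList).map String.ofList).map PySem.Str.strip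
        else [PySem.Str.strip item]).filter (fun p => p != ""))) acc
    = xs.foldl (fun res item => pvScan item.toList [] res) acc := by
  induction xs with
  | nil => intro acc; rfl
  | cons x rest ih =>
    intro acc
    simp only [List.foldl_cons]
    rw [ih, pv_item_eq x, pvScan_eq x.toList [] acc,
      pvConsHead_nil _ (pvSplit_ne_nil x.toList)]

-- ===== VERDICT (by name: the statement is the Claim_ definition above) =====
theorem normalize_brush_list_py_spec : Claim_equal_normalize_brush_list_py := by
  intro v _
  unfold Spec_normalize_brush_list_py normalize_brush_list_py normalize_brush_list_py_alt
  cases v with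
  | none => rfl
  | some xs =>
    by_cases h : xs = []
    · simp [h]
    · simp only [if_neg h]
      rw [pv_foldl_eq xs []]
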